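-- pv_equiv track=rewrite | github.com/yish91/context-compiler | context_compiler/fs_utils.py | is_test_like_path
-- ===== SOURCE A (Python) =====
-- TEST_PATH_SEGMENTS: frozenset[str] = frozenset(
--     {
--         "test",
--         "tests",
--         "spec",
--         "specs",
--         "__tests__",
--         "__test__",
--     }
-- )
--
-- def _path_segments(path: str) -> list[str]:
--     """Split a path into its directory and file segments."""
--     return path.replace("\\", "/").split("/")
--
-- def is_test_like_path(path: str) -> bool:
--     """Return True if the path appears to be test code."""
--     segments = _path_segments(path)
--     # Check directory segments
--     for segment in segments[:-1]:
--         if segment.lower() in TEST_PATH_SEGMENTS: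
--             return True
--     # Check filename
--     filename = segments[-1].lower() if segments else ""
--     if filename.startswith("test_") or filename.startswith("test."):
--         return True
--     if (
--         filename.endswith("_test.py")
--         or filename.endswith(".test.ts")
--         or filename.endswith(".test.tsx")
--     ):
--         return True
--     if filename.endswith(".test.js") or filename.endswith(".test.jsx"):
--         return True
--     if (
--         filename.endswith("_spec.rb")
--         or filename.endswith(".spec.ts")
--         or filename.endswith(".spec.js")
--     ):
--         return True
--     return False
-- ===== SOURCE B (Python) =====
-- _DIR_PATTERNS = (
--     "/test/",
--     "/tests/",
--     "/spec/",
--     "/specs/",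
--     "/__tests__/",
--     "/__test__/",
-- )
--
-- _SUFFIXES = (
--     "_test.py",
--     ".test.ts",
--     ".test.tsx",
--     ".test.js",
--     ".test.jsx",
--     "_spec.rb",
--     ".spec.ts",
--     ".spec.js",
-- )
--
--
-- def is_test_like_path(path: str) -> bool:
--     """Return True if the path appears to be test code."""
--     # Normalise once: forward slashes, lower case, and a leading "/" sentinel
--     # so every directory segment is surrounded by slashes.
--     p = "/" + path.replace("\\", "/").lower()
--     if any(d in p for d in _DIR_PATTERNS):
--         return True
--     filename = p[p.rfind("/") + 1:]
--     if filename.startswith("test_") or filename.startswith("test."):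
--         return True
--     return p.endswith(_SUFFIXES)
-- ===== Notes on version B (the rewrite author's own statement) =====
-- stated objective: idiomatic
-- what changed: B normalises the path once (forward slashes, lower case, a leading slash sentinel) and decides the directory part by whole-string substring search for slash-delimited segment patterns and the filename part by one rfind plus prefix/suffix tests on the normalised string, instead of A's split into segments with a per-segment lowercase-and-set-membership loop.
import Mathlib
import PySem

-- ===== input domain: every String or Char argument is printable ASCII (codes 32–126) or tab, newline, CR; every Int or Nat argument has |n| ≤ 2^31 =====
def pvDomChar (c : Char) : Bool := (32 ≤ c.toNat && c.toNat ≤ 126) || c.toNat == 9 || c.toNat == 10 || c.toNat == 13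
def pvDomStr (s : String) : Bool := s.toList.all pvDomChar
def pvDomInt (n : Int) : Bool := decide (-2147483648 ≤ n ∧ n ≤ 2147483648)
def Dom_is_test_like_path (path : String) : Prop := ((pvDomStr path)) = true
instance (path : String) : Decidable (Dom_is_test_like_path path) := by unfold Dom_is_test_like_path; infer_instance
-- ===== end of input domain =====

-- B replaces A's split-into-segments loop by one normalisation pass (slashes, lower case,
-- a leading "/" sentinel) followed by whole-string substring / prefix / suffix tests (idiomatic; same cost).

-- ===== PORT A =====
def TEST_PATH_SEGMENTS : PySem.Set (List Char) :=
  PySem.Set.ofList ["test".toList, "tests".toList, "spec".toList, "specs".toList,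
                    "__tests__".toList, "__test__".toList]

-- helper _path_segments: path.replace("\\", "/").split("/")
def path_segments (path : String) : List (List Char) :=
  PySem.Chars.splitOn (PySem.Chars.replace path.toList "\\".toList "/".toList) "/".toList

def is_test_like_path (path : String) : Bool :=
  let segments := path_segments path
  -- for segment in segments[:-1]: if segment.lower() in TEST_PATH_SEGMENTS: return True
  if (PySem.List.slice segments none (some (-1))).any
      (fun segment => List.contains TEST_PATH_SEGMENTS (PySem.Chars.lower segment)) then true
  else
    -- filename = segments[-1].lower() if segments else ""
    let filename := if segments.isEmpty then [] else PySem.Chars.lower (PySem.List.pyGetD segments (-1) [])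
    if PySem.Chars.startswith filename "test_".toList || PySem.Chars.startswith filename "test.".toList then true
    else if PySem.Chars.endswith filename "_test.py".toList || PySem.Chars.endswith filename ".test.ts".toList
         || PySem.Chars.endswith filename ".test.tsx".toList then true
    else if PySem.Chars.endswith filename ".test.js".toList || PySem.Chars.endswith filename ".test.jsx".toList then true
    else if PySem.Chars.endswith filename "_spec.rb".toList || PySem.Chars.endswith filename ".spec.ts".toList
         || PySem.Chars.endswith filename ".spec.js".toList then true
    else false

-- ===== PORT B =====
def DIR_PATTERNS : List (List Char) :=
  ["/test/".toList, "/tests/".toList, "/spec/".toList, "/specs/".toList,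
   "/__tests__/".toList, "/__test__/".toList]

def SUFFIXES : List (List Char) :=
  ["_test.py".toList, ".test.ts".toList, ".test.tsx".toList, ".test.js".toList,
   ".test.jsx".toList, "_spec.rb".toList, ".spec.ts".toList, ".spec.js".toList]

def is_test_like_path_alt (path : String) : Bool :=
  -- p = "/" + path.replace("\\", "/").lower()   (the "/" + s concatenation is ported as cons on the char list)
  let p : List Char := '/' :: PySem.Chars.lower (PySem.Chars.replace path.toList "\\".toList "/".toList)
  if DIR_PATTERNS.any (fun d => PySem.Chars.isIn d p) then true
  else
    -- filename = p[p.rfind("/") + 1:]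
    let filename := PySem.List.slice p (some (PySem.Chars.rfind p "/".toList + 1)) none
    if PySem.Chars.startswith filename "test_".toList || PySem.Chars.startswith filename "test.".toList then true
    else SUFFIXES.any (fun suffix => PySem.Chars.endswith p suffix)

-- ===== PRECONDITION & SPEC =====
def Spec_is_test_like_path (path : String) (out : Bool) : Prop := out = is_test_like_path_alt path
instance (path : String) (out : Bool) : Decidable (Spec_is_test_like_path path out) := by unfold Spec_is_test_like_path; infer_instance

-- ===== CLAIM (what is proved, stated in full; the proofs are below) =====
def Claim_equal_is_test_like_path : Prop := ∀ (path : String), Dom_is_test_like_path path → Spec_is_test_like_path path (is_test_like_path path)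

-- ===== LEMMAS AND PROOFS =====

-- reference split on '/' (proof-only)
def psplit : List Char → List (List Char)
  | [] => [[]]
  | c :: t => if c = '/' then [] :: psplit t else (c :: (psplit t).headI) :: (psplit t).tail

-- maximal slash-free suffix (proof-only)
def rtake (q : List Char) : List Char :=
  (q.reverse.takeWhile (fun a => decide (a ≠ '/'))).reverse

theorem psplit_ne_nil (q : List Char) : psplit q ≠ [] := by
  cases q with
  | nil => simp [psplit]
  | cons c t => unfold psplit; split_ifs <;> simp

theorem psplit_cons_slash (t : List Char) : psplit ('/' :: t) = [] :: psplit t := by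
  simp [psplit]

theorem psplit_cons_of_ne {c : Char} (hc : c ≠ '/') (t : List Char) :
    psplit (c :: t) = (c :: (psplit t).headI) :: (psplit t).tail := by
  simp [psplit, hc]

theorem getLastD_irrel {α : Type} (l : List α) (h : l ≠ []) (a b : α) :
    l.getLastD a = l.getLastD b := by
  rw [List.getLastD_eq_getLast?, List.getLastD_eq_getLast?, List.getLast?_eq_some_getLast h]
  rfl

theorem splitOn_go_nil (sep : List Char) (n : Nat) (cur : List Char) (acc : List (List Char)) :
    PySem.Chars.splitOn.go sep (n+1) [] cur acc = (cur.reverse :: acc).reverse := rfl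

theorem splitOn_go_cons (sep : List Char) (n : Nat) (c : Char) (t cur : List Char) (acc : List (List Char)) :
    PySem.Chars.splitOn.go sep (n+1) (c::t) cur acc =
      if sep.isPrefixOf (c::t) then PySem.Chars.splitOn.go sep n ((c::t).drop sep.length) [] (cur.reverse :: acc)
      else PySem.Chars.splitOn.go sep n t (c::cur) acc := rfl

theorem splitOn_go_spec (fuel : Nat) : ∀ (q cur : List Char) (acc : List (List Char)), q.length < fuel →
    PySem.Chars.splitOn.go ['/'] fuel q cur acc
      = acc.reverse ++ (cur.reverse ++ (psplit q).headI) :: (psplit q).tail := by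
  induction fuel with
  | zero => intro q cur acc h; exact absurd h (by omega)
  | succ n ih =>
    intro q cur acc h
    rcases q with _ | ⟨c, t⟩
    · rw [splitOn_go_nil]; simp [psplit]
    · rw [splitOn_go_cons]
      rcases hps : psplit t with _ | ⟨h0, tl⟩
      · exact absurd hps (psplit_ne_nil t)
      by_cases hc : c = '/'
      · subst hc
        rw [if_pos (by simp [List.isPrefixOf])]
        rw [show (('/'::t).drop (['/'] : List Char).length) = t from rfl]
        rw [ih t [] (cur.reverse :: acc) (by simpa using h)]
        simp [psplit, hps]
      · rw [if_neg (by simp [List.isPrefixOf]; exact fun x => absurd x.symm hc)]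
        rw [ih t (c :: cur) acc (by simpa using h)]
        simp [psplit, hc, hps]

theorem splitOn_eq_psplit (q : List Char) : PySem.Chars.splitOn q "/".toList = psplit q := by
  have h := splitOn_go_spec (q.length + 1) q [] [] (by omega)
  rcases hps : psplit q with _ | ⟨h0, tl⟩
  · exact absurd hps (psplit_ne_nil q)
  rw [hps] at h
  show PySem.Chars.splitOn.go ['/'] (q.length + 1) q [] [] = _
  simpa using h

theorem lowerChar_slash (c : Char) : PySem.Chars.lowerChar c = '/' ↔ c = '/' := by
  unfold PySem.Chars.lowerChar PySem.Chars.isupper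
  split_ifs with h
  · simp only [Bool.and_eq_true, decide_eq_true_eq] at h
    have hz : c.toNat ≤ 90 := by
      have := h.2; rw [Char.le_def, UInt32.le_iff_toNat_le] at this; exact this
    have ha : 65 ≤ c.toNat := by
      have := h.1; rw [Char.le_def, UInt32.le_iff_toNat_le] at this; exact this
    constructor
    · intro he
      have h47 : (Char.ofNat (c.toNat + 32)).toNat = 47 := by rw [he]; rfl
      rw [Char.toNat_ofNat, if_pos (Or.inl (by omega))] at h47
      omega
    · rintro rfl; exact absurd ha (by decide)
  · exact Iff.rfl

theorem psplit_lower (q : List Char) :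
    psplit (PySem.Chars.lower q) = (psplit q).map PySem.Chars.lower := by
  induction q with
  | nil => simp [psplit, PySem.Chars.lower]
  | cons c t ih =>
    show psplit (PySem.Chars.lowerChar c :: PySem.Chars.lower t) = _
    by_cases hc : c = '/'
    · subst hc
      rw [show PySem.Chars.lowerChar '/' = '/' from (lowerChar_slash _).mpr rfl]
      rw [psplit_cons_slash, psplit_cons_slash, ih]
      rfl
    · have hlc : PySem.Chars.lowerChar c ≠ '/' := fun e => hc ((lowerChar_slash c).mp e)
      rw [psplit_cons_of_ne hlc, psplit_cons_of_ne hc, ih]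
      rcases hps : psplit t with _ | ⟨h0, tl⟩
      · exact absurd hps (psplit_ne_nil t)
      simp [PySem.Chars.lower]

theorem psplit_of_not_mem : ∀ {t : List Char}, '/' ∉ t → psplit t = [t] := by
  intro t
  induction t with
  | nil => intro _; rfl
  | cons c t ih =>
    intro h
    have hc : c ≠ '/' := fun e => h (by simp [e])
    simp [psplit, hc, ih (fun m => h (List.mem_cons_of_mem _ m))]

theorem psplit_tail_eq_nil : ∀ {t : List Char}, (psplit t).tail = [] ↔ '/' ∉ t := by
  intro t
  induction t with
  | nil => simp [psplit]
  | cons c t ih =>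
    by_cases hc : c = '/'
    · subst hc; simp [psplit, psplit_ne_nil t]
    · rcases hps : psplit t with _ | ⟨h0, tl⟩
      · exact absurd hps (psplit_ne_nil t)
      rw [hps] at ih
      simp only [List.tail_cons] at ih
      simp only [psplit_cons_of_ne hc, hps, List.headI_cons, List.tail_cons, List.mem_cons, not_or, ih]
      constructor
      · intro ht; exact ⟨fun e => hc e.symm, ht⟩
      · intro ht; exact ht.2

theorem prefix_slash_iff : ∀ (q seg : List Char), '/' ∉ seg →
    ((seg ++ ['/']) <+: q ↔ (psplit q).headI = seg ∧ (psplit q).tail ≠ []) := by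
  intro q
  induction q with
  | nil =>
    intro seg hs
    simp [psplit]
  | cons c t ih =>
    intro seg hs
    by_cases hc : c = '/'
    · subst hc
      rcases seg with _ | ⟨d, s'⟩
      · simpa [psplit] using psplit_ne_nil t
      · have hd : d ≠ '/' := fun e => hs (by simp [e])
        rw [psplit_cons_slash]
        simp only [List.cons_append, List.cons_prefix_cons, List.headI_cons, List.tail_cons]
        constructor
        · rintro ⟨e, -⟩; exact absurd e hd
        · rintro ⟨e, -⟩; exact absurd e.symm (by simp)
    · rcases hps : psplit t with _ | ⟨h0, tl⟩
      · exact absurd hps (psplit_ne_nil t)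
      rcases seg with _ | ⟨d, s'⟩
      · rw [psplit_cons_of_ne hc, hps]
        simp only [List.nil_append, List.headI_cons, List.tail_cons]
        constructor
        · intro hp
          rw [List.cons_prefix_cons] at hp
          exact absurd hp.1.symm hc
        · rintro ⟨he, -⟩; exact absurd he (by simp)
      · have hs' : '/' ∉ s' := fun m => hs (List.mem_cons_of_mem _ m)
        have hih := ih s' hs'
        rw [hps] at hih
        simp only [List.headI_cons, List.tail_cons] at hih
        rw [psplit_cons_of_ne hc, hps]
        simp only [List.cons_append, List.cons_prefix_cons, List.headI_cons, List.tail_cons, hih]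
        constructor
        · rintro ⟨rfl, rfl, ht⟩; exact ⟨rfl, ht⟩
        · rintro ⟨he, ht⟩
          obtain ⟨rfl, rfl⟩ := List.cons.inj he
          exact ⟨rfl, rfl, ht⟩

theorem infix_slash_iff {seg : List Char} (hs : '/' ∉ seg) : ∀ (q : List Char),
    ('/' :: (seg ++ ['/'])) <:+: q ↔ seg ∈ (psplit q).tail.dropLast := by
  intro q
  induction q with
  | nil => simp [psplit]
  | cons c t ih =>
    rw [List.infix_cons_iff]
    rcases hps : psplit t with _ | ⟨h0, tl⟩
    · exact absurd hps (psplit_ne_nil t)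
    rw [hps] at ih
    simp only [List.tail_cons] at ih
    by_cases hc : c = '/'
    · subst hc
      have hpre := prefix_slash_iff t seg hs
      rw [hps] at hpre
      simp only [List.headI_cons, List.tail_cons] at hpre
      rw [psplit_cons_slash, hps, List.cons_prefix_cons, hpre, ih]
      simp only [List.tail_cons]
      rcases tl with _ | ⟨u, us⟩
      · simp
      · simp [List.dropLast_cons₂, eq_comm]
    · rw [psplit_cons_of_ne hc, hps]
      simp only [List.tail_cons]
      have hnp : ¬ (('/' :: (seg ++ ['/'])) <+: (c :: t)) := by
        rw [List.cons_prefix_cons]; rintro ⟨e, -⟩; exact hc e.symm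
      simp [hnp, ih]

theorem dir_pattern_iff {seg : List Char} (hs : '/' ∉ seg) (q : List Char) :
    ('/' :: (seg ++ ['/'])) <:+: ('/' :: q) ↔ seg ∈ (psplit q).dropLast := by
  rw [List.infix_cons_iff, List.cons_prefix_cons]
  have hpre := prefix_slash_iff q seg hs
  have hin := infix_slash_iff hs q
  rcases hps : psplit q with _ | ⟨h0, tl⟩
  · exact absurd hps (psplit_ne_nil q)
  rw [hps] at hpre hin
  simp only [List.headI_cons, List.tail_cons] at hpre hin
  rw [hpre, hin]
  rcases tl with _ | ⟨u, us⟩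
  · simp
  · simp [List.dropLast_cons₂, eq_comm]

theorem takeWhile_all_of_not_mem {r : List Char} (hnr : '/' ∉ r) :
    List.takeWhile (fun a => decide (a ≠ '/')) r.reverse = r.reverse := by
  apply List.takeWhile_eq_self_iff.mpr
  intro a ha
  simpa using fun e => hnr (by rw [← e]; simpa using ha)

theorem takeWhile_slashfree (r X : List Char) (hnr : '/' ∉ r) :
    List.takeWhile (fun a => decide (a ≠ '/')) (r.reverse ++ '/' :: X) = r.reverse := by
  rw [List.takeWhile_append, if_pos (by rw [takeWhile_all_of_not_mem hnr])]
  rw [show List.takeWhile (fun a => decide (a ≠ '/')) ('/' :: X) = [] from by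
        simp]
  exact List.append_nil _

theorem rtake_cons_slash (q : List Char) : rtake ('/' :: q) = rtake q := by
  unfold rtake
  rw [List.reverse_cons, List.takeWhile_append]
  split_ifs with h
  · have heq := (List.takeWhile_prefix (l := q.reverse) (fun a => decide (a ≠ '/'))).eq_of_length h
    rw [show List.takeWhile (fun a => decide (a ≠ '/')) ['/'] = [] from rfl, List.append_nil, heq]
  · rfl

theorem psplit_getLast (q : List Char) : (psplit q).getLastD [] = rtake q := by
  induction q with
  | nil => rfl
  | cons c t ih =>
    by_cases hc : c = '/'
    · subst hc
      rw [rtake_cons_slash, psplit_cons_slash, List.getLastD_cons]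
      exact ih
    · rcases hps : psplit t with _ | ⟨h0, tl⟩
      · exact absurd hps (psplit_ne_nil t)
      unfold rtake
      rw [List.reverse_cons, List.takeWhile_append]
      split_ifs with h
      · have hfull := (List.takeWhile_prefix (l := t.reverse) (fun a => decide (a ≠ '/'))).eq_of_length h
        have hnot : '/' ∉ t := by
          intro m
          have hm : ('/' : Char) ∈ List.takeWhile (fun a => decide (a ≠ '/')) t.reverse := by
            rw [hfull]; simpa using m
          simpa using List.mem_takeWhile_imp hm
        rw [psplit_of_not_mem (by
              simp only [List.mem_cons, not_or]; exact ⟨fun e => hc e.symm, hnot⟩)]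
        rw [show List.takeWhile (fun a => decide (a ≠ '/')) [c] = [c] from by
              simp [hc]]
        simp
      · have hmem : '/' ∈ t := by
          by_contra hnot
          apply h
          rw [takeWhile_all_of_not_mem hnot]
        have htl : tl ≠ [] := by
          intro e
          have h2 := psplit_tail_eq_nil (t := t)
          rw [hps, e] at h2
          exact absurd (h2.mp rfl) (by simpa using hmem)
        rw [psplit_cons_of_ne hc, hps]
        simp only [List.headI_cons, List.tail_cons, List.getLastD_cons]
        rw [getLastD_irrel tl htl (c :: h0) []]
        unfold rtake at ih
        rw [hps, List.getLastD_cons, getLastD_irrel tl htl h0 []] at ih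
        exact ih

theorem rfind_go_zero (s sub : List Char) :
    PySem.Chars.rfind.go s sub 0 = if sub.isPrefixOf s then (0:Int) else -1 := rfl

theorem rfind_go_succ (s sub : List Char) (j : Nat) :
    PySem.Chars.rfind.go s sub (j+1) =
      if sub.isPrefixOf (s.drop (j+1)) then ((j:Int)+1) else PySem.Chars.rfind.go s sub j := rfl

theorem rtake_of_split {p r : List Char} (k : Nat) (hr : p.drop k = '/' :: r) (hnr : '/' ∉ r) :
    rtake p = r := by
  unfold rtake
  conv_lhs => rw [show p = p.take k ++ '/' :: r from by rw [← hr]; exact (List.take_append_drop _ _).symm]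
  rw [List.reverse_append, List.reverse_cons, List.append_assoc,
      show (['/'] : List Char) ++ (p.take k).reverse = '/' :: (p.take k).reverse from rfl,
      takeWhile_slashfree _ _ hnr, List.reverse_reverse]

theorem rfind_go_spec (p : List Char) : ∀ (k : Nat), '/' ∉ p.drop (k+1) →
    ('/' ∈ p.take (k+1) → 0 ≤ PySem.Chars.rfind.go p ['/'] k ∧
      p.drop ((PySem.Chars.rfind.go p ['/'] k).toNat + 1) = rtake p) ∧
    ('/' ∉ p.take (k+1) → PySem.Chars.rfind.go p ['/'] k = -1) := by
  intro k
  induction k with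
  | zero =>
    intro hd
    rw [rfind_go_zero]
    by_cases hp : (['/'] : List Char).isPrefixOf p
    · rw [if_pos hp]
      obtain ⟨r, hr⟩ : ∃ r, p = '/' :: r := by
        rcases p with _ | ⟨a, r⟩
        · simp [List.isPrefixOf] at hp
        · simp [List.isPrefixOf] at hp
          exact ⟨r, by rw [hp]⟩
      subst hr
      constructor
      · intro _
        refine ⟨le_refl _, ?_⟩
        simp only [Int.toNat_zero, Nat.zero_add]
        exact (rtake_of_split 0 (by simp) (by simpa using hd)).symm
      · intro hm
        exact absurd (by simp : ('/' : Char) ∈ ('/'::r).take 1) hm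
    · rw [if_neg hp]
      constructor
      · intro hm
        exfalso
        rcases p with _ | ⟨a, r⟩
        · simp at hm
        · have ha : '/' = a := by simpa using hm
          rw [← ha] at hp
          simp [List.isPrefixOf] at hp
      · intro _; rfl
  | succ k ih =>
    intro hd
    rw [rfind_go_succ]
    by_cases hp : (['/'] : List Char).isPrefixOf (p.drop (k+1))
    · rw [if_pos hp]
      obtain ⟨r, hr⟩ : ∃ r, p.drop (k+1) = '/' :: r := by
        rcases hdd : p.drop (k+1) with _ | ⟨a, r⟩
        · rw [hdd] at hp; simp [List.isPrefixOf] at hp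
        · rw [hdd] at hp; simp [List.isPrefixOf] at hp
          exact ⟨r, by rw [hp]⟩
      have hr2 : p.drop (k+1+1) = r := by
        rw [← List.tail_drop, hr, List.tail_cons]
      have hnr : '/' ∉ r := by rw [← hr2]; exact hd
      constructor
      · intro _
        refine ⟨by omega, ?_⟩
        rw [show (((k:Nat):Int)+1).toNat + 1 = k + 1 + 1 from by omega]
        rw [hr2]
        exact (rtake_of_split (k+1) hr hnr).symm
      · intro hm
        exfalso
        apply hm
        rw [List.take_add, hr]
        simp
    · rw [if_neg hp]
      have hd' : '/' ∉ p.drop (k+1) := by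
        rcases hdd : p.drop (k+1) with _ | ⟨a, r⟩
        · simp
        · have ha : a ≠ '/' := by
            intro e
            rw [hdd, e] at hp
            simp [List.isPrefixOf] at hp
          have hrr : r = p.drop (k+1+1) := by
            rw [← List.tail_drop, hdd, List.tail_cons]
          simp only [List.mem_cons, not_or]
          exact ⟨fun e => ha e.symm, by rw [hrr]; exact hd⟩
      have hih := ih hd'
      have htk : (('/' : Char) ∈ p.take (k+1+1)) ↔ (('/' : Char) ∈ p.take (k+1)) := by
        rw [List.take_add]
        have hno : ('/' : Char) ∉ (p.drop (k+1)).take 1 := fun m => hd' (List.mem_of_mem_take m)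
        simp only [List.mem_append]
        exact ⟨fun h => h.elim id (fun m => absurd m hno), Or.inl⟩
      exact ⟨fun hm => hih.1 (htk.mp hm), fun hm => hih.2 (fun m => hm (htk.mpr m))⟩

theorem filename_eq_rtake (q : List Char) :
    PySem.List.slice ('/' :: q) (some (PySem.Chars.rfind ('/' :: q) "/".toList + 1)) none
      = rtake ('/' :: q) := by
  have hdropnil : ('/'::q).drop (q.length + 1) = [] := by
    rw [show q.length + 1 = ('/'::q).length from rfl]; exact List.drop_length
  have h0 : PySem.Chars.rfind ('/'::q) "/".toList = PySem.Chars.rfind.go ('/'::q) ['/'] (q.length + 1) := rfl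
  have hstep : PySem.Chars.rfind.go ('/'::q) ['/'] (q.length + 1) = PySem.Chars.rfind.go ('/'::q) ['/'] q.length := by
    rw [rfind_go_succ, if_neg]
    rw [hdropnil]
    simp [List.isPrefixOf]
  have hd : '/' ∉ ('/'::q).drop (q.length + 1) := by rw [hdropnil]; simp
  have hmem : '/' ∈ ('/'::q).take (q.length + 1) := by
    rw [show q.length + 1 = ('/'::q).length from rfl, List.take_length]
    simp
  obtain ⟨hge, hdrop⟩ := ((rfind_go_spec ('/'::q) q.length) hd).1 hmem
  rw [h0, hstep]
  have hslice : PySem.List.slice ('/'::q) (some (PySem.Chars.rfind.go ('/'::q) ['/'] q.length + 1)) none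
      = ('/'::q).drop (PySem.Chars.rfind.go ('/'::q) ['/'] q.length + 1).toNat :=
    PySem.List.slice_from _ (by omega)
  rw [hslice, show (PySem.Chars.rfind.go ('/'::q) ['/'] q.length + 1).toNat
      = (PySem.Chars.rfind.go ('/'::q) ['/'] q.length).toNat + 1 from by omega]
  exact hdrop

theorem prefix_takeWhile_of_all : ∀ (l₁ : List Char) {l₂ : List Char} {pr : Char → Bool},
    l₁ <+: l₂ → (∀ a ∈ l₁, pr a) → l₁ <+: l₂.takeWhile pr := by
  intro l₁
  induction l₁ with
  | nil => intro _ _ _ _; exact List.nil_prefix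
  | cons a l ih =>
    intro l₂ pr h ha
    rcases l₂ with _ | ⟨b, l₂⟩
    · simp at h
    · rw [List.cons_prefix_cons] at h
      obtain ⟨rfl, h2⟩ := h
      rw [List.takeWhile_cons, if_pos (ha a (by simp))]
      exact List.cons_prefix_cons.mpr ⟨rfl, ih h2 (fun x hx => ha x (by simp [hx]))⟩

theorem suffix_iff_suffix_rtake {suf : List Char} (hs : '/' ∉ suf) (p : List Char) :
    suf <:+ p ↔ suf <:+ rtake p := by
  constructor
  · intro h
    have h1 : suf.reverse <+: p.reverse := List.reverse_prefix.mpr h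
    have h2 : suf.reverse <+: p.reverse.takeWhile (fun a => decide (a ≠ '/')) :=
      prefix_takeWhile_of_all _ h1 (by
        intro a ha
        simpa using fun e => hs (by rw [← e]; simpa using ha))
    have h3 : suf.reverse <+: (rtake p).reverse := by
      unfold rtake; simpa using h2
    exact List.reverse_prefix.mp h3
  · intro h
    refine h.trans ?_
    have h1 : (p.reverse.takeWhile (fun a => decide (a ≠ '/'))).reverse <:+ p.reverse.reverse :=
      List.reverse_suffix.mpr (List.takeWhile_prefix _)
    rw [List.reverse_reverse] at h1
    exact h1

theorem if_true_or (c x : Bool) : (if c then true else x) = (c || x) := by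
  cases c <;> simp

theorem bool_chain (e1 e2 e3 e4 e5 e6 e7 e8 : Bool) :
    (if e1 || e2 || e3 then true else if e4 || e5 then true else if e6 || e7 || e8 then true else false)
      = (e1 || (e2 || (e3 || (e4 || (e5 || (e6 || (e7 || (e8 || false)))))))) := by
  rw [if_true_or, if_true_or, if_true_or]
  simp [Bool.or_assoc]

-- ===== VERDICT (by name: the statement is the Claim_ definition above) =====
theorem is_test_like_path_spec : Claim_equal_is_test_like_path := by
  intro path _
  show is_test_like_path path = is_test_like_path_alt path
  simp only [is_test_like_path, is_test_like_path_alt, path_segments, splitOn_eq_psplit]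
  set r : List Char := PySem.Chars.replace path.toList "\\".toList "/".toList with hrdef
  set q : List Char := PySem.Chars.lower r with hqdef
  have hTS : TEST_PATH_SEGMENTS = ["test".toList, "tests".toList, "spec".toList, "specs".toList,
      "__tests__".toList, "__test__".toList] := by decide
  have honedir : ∀ seg : List Char, '/' ∉ seg →
      (PySem.Chars.isIn ('/' :: (seg ++ ['/'])) ('/' :: q) = true ↔
        ∃ s ∈ (psplit r).dropLast, PySem.Chars.lower s = seg) := by
    intro seg hsg
    rw [PySem.Chars.isIn_iff_infix, dir_pattern_iff hsg, hqdef, psplit_lower, ← List.map_dropLast]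
    exact List.mem_map
  have hdir : (PySem.List.slice (psplit r) none (some (-1))).any
        (fun segment => List.contains TEST_PATH_SEGMENTS (PySem.Chars.lower segment))
      = DIR_PATTERNS.any (fun d => PySem.Chars.isIn d ('/' :: q)) := by
    rw [PySem.List.slice_to_neg_one, Bool.eq_iff_iff]
    simp only [List.any_eq_true, DIR_PATTERNS, List.any_cons, List.any_nil, Bool.or_eq_true,
        Bool.false_eq_true, or_false]
    rw [show ("/test/".toList : List Char) = '/' :: ("test".toList ++ ['/']) from rfl,
        show ("/tests/".toList : List Char) = '/' :: ("tests".toList ++ ['/']) from rfl,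
        show ("/spec/".toList : List Char) = '/' :: ("spec".toList ++ ['/']) from rfl,
        show ("/specs/".toList : List Char) = '/' :: ("specs".toList ++ ['/']) from rfl,
        show ("/__tests__/".toList : List Char) = '/' :: ("__tests__".toList ++ ['/']) from rfl,
        show ("/__test__/".toList : List Char) = '/' :: ("__test__".toList ++ ['/']) from rfl,
        honedir _ (by decide), honedir _ (by decide), honedir _ (by decide),
        honedir _ (by decide), honedir _ (by decide), honedir _ (by decide), hTS]
    simp only [List.contains_iff_mem, List.mem_cons, List.not_mem_nil, or_false]
    constructor
    · rintro ⟨s, hm, (h|h|h|h|h|h)⟩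
      · exact Or.inl ⟨s, hm, h⟩
      · exact Or.inr (Or.inl ⟨s, hm, h⟩)
      · exact Or.inr (Or.inr (Or.inl ⟨s, hm, h⟩))
      · exact Or.inr (Or.inr (Or.inr (Or.inl ⟨s, hm, h⟩)))
      · exact Or.inr (Or.inr (Or.inr (Or.inr (Or.inl ⟨s, hm, h⟩))))
      · exact Or.inr (Or.inr (Or.inr (Or.inr (Or.inr ⟨s, hm, h⟩))))
    · rintro (⟨s, hm, h⟩|⟨s, hm, h⟩|⟨s, hm, h⟩|⟨s, hm, h⟩|⟨s, hm, h⟩|⟨s, hm, h⟩)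
      · exact ⟨s, hm, Or.inl h⟩
      · exact ⟨s, hm, Or.inr (Or.inl h)⟩
      · exact ⟨s, hm, Or.inr (Or.inr (Or.inl h))⟩
      · exact ⟨s, hm, Or.inr (Or.inr (Or.inr (Or.inl h)))⟩
      · exact ⟨s, hm, Or.inr (Or.inr (Or.inr (Or.inr (Or.inl h))))⟩
      · exact ⟨s, hm, Or.inr (Or.inr (Or.inr (Or.inr (Or.inr h))))⟩
  have hne : psplit r ≠ [] := psplit_ne_nil r
  have hfn : (if (psplit r).isEmpty then ([] : List Char)
        else PySem.Chars.lower (PySem.List.pyGetD (psplit r) (-1) []))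
      = PySem.List.slice ('/' :: q) (some (PySem.Chars.rfind ('/' :: q) "/".toList + 1)) none := by
    rw [filename_eq_rtake q, rtake_cons_slash, hqdef, ← psplit_getLast, psplit_lower]
    rcases hps : psplit r with _ | ⟨h0, tl⟩
    · exact absurd hps hne
    rw [if_neg (by simp)]
    have hpg : PySem.List.pyGetD (h0 :: tl) (-1) ([] : List Char) = (h0 :: tl).getLast (by simp) := by
      first
        | exact PySem.List.pyGetD_neg_one _ (by simp)
        | exact PySem.List.pyGetD_neg_one (by simp)
        | simp [PySem.List.pyGetD_neg_one]
    rw [hpg, List.getLastD_eq_getLast?, List.getLast?_map,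
        List.getLast?_eq_some_getLast (by simp : (h0 :: tl) ≠ [])]
    rfl
  have hsuf : ∀ suf : List Char, '/' ∉ suf →
      PySem.Chars.endswith ('/' :: q) suf
        = PySem.Chars.endswith
            (PySem.List.slice ('/' :: q) (some (PySem.Chars.rfind ('/' :: q) "/".toList + 1)) none) suf := by
    intro suf hsf
    rw [filename_eq_rtake q, Bool.eq_iff_iff, PySem.Chars.endswith_iff, PySem.Chars.endswith_iff]
    exact suffix_iff_suffix_rtake hsf _
  rw [hdir, hfn]
  cases hDB : DIR_PATTERNS.any (fun d => PySem.Chars.isIn d ('/' :: q)) with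
  | true => simp
  | false =>
    simp only [Bool.false_eq_true, if_false]
    cases hST : (PySem.Chars.startswith
          (PySem.List.slice ('/' :: q) (some (PySem.Chars.rfind ('/' :: q) "/".toList + 1)) none)
          "test_".toList
        || PySem.Chars.startswith
          (PySem.List.slice ('/' :: q) (some (PySem.Chars.rfind ('/' :: q) "/".toList + 1)) none)
          "test.".toList) with
    | true => simp
    | false =>
      simp only [Bool.false_eq_true, if_false]
      simp only [SUFFIXES, List.any_cons, List.any_nil]
      rw [hsuf _ (by decide), hsuf _ (by decide), hsuf _ (by decide), hsuf _ (by decide),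
          hsuf _ (by decide), hsuf _ (by decide), hsuf _ (by decide), hsuf _ (by decide)]
      exact bool_chain _ _ _ _ _ _ _ _
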